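-- pv_equiv track=rewrite | github.com/oleeahmmed/ezydreamerp | Hrm/views/zktico/monthly_attendance_summary.py | _group_summaries_by_department
-- ===== SOURCE A (Python) =====
-- def _group_summaries_by_department(employee_summaries):
--     """Group employee summaries by department."""
--     from collections import defaultdict, OrderedDict
--
--     grouped = defaultdict(list)
--
--     for summary in employee_summaries:
--         dept = summary['department']
--         grouped[dept].append(summary)
--
--     # Sort departments and employees within each department
--     result = OrderedDict()
--     for dept in sorted(grouped.keys()):
--         result[dept] = sorted(grouped[dept], key=lambda x: x['employee_id'])
--
--     return result
-- ===== SOURCE B (Python) =====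
-- def _group_summaries_by_department(employee_summaries):
--     """Group employee summaries by department.
--
--     Sort-then-group: one global stable sort by the (department, employee_id)
--     tuple key, then peel off maximal runs of equal department from the front
--     of the sorted list; no grouping dict is ever built.
--     """
--     from collections import OrderedDict
--
--     rest = sorted(employee_summaries,
--                   key=lambda x: (x['department'], x['employee_id']))
--
--     result = OrderedDict()
--     while rest:
--         dept = rest[0]['department']
--         j = 0
--         while j < len(rest) and rest[j]['department'] == dept:
--             j += 1
--         result[dept] = rest[:j]
--         rest = rest[j:]
--     return result
-- ===== Notes on version B (the rewrite author's own statement) =====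
-- stated objective: alternative
-- what changed: Replaces A's defaultdict group-then-sort (hash grouping pass, sort of the keys, then a sort per department) by one global stable sort under the (department, employee_id) tuple key followed by a run-peeling loop that slices off each maximal equal-department run of the sorted list; no grouping dict is built.
import Mathlib
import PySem

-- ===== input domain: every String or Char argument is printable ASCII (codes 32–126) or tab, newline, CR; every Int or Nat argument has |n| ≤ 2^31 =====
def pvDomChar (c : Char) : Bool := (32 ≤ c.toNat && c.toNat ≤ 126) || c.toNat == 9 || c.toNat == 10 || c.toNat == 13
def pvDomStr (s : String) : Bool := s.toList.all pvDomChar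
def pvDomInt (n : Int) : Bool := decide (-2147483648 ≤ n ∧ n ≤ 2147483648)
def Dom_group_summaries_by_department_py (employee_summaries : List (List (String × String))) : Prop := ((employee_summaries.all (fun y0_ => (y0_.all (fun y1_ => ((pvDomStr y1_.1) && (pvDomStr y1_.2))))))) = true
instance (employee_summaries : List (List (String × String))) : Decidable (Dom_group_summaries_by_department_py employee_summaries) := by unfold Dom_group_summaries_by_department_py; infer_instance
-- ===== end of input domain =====

-- ===== PORT A =====
-- B replaces A's group-then-sort (defaultdict pass, sorted keys, per-department sorts) by one global
-- stable sort under the (department, employee_id) tuple key followed by a run-peeling loop over the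
-- sorted list; same cost class, a different decomposition, no grouping dict.

-- summary['department'] / summary['employee_id']: the dict lookup, totalized by .getD ""; Pre_
-- guarantees the key is present, so the default is never taken (Python raises KeyError where get? is none).
def pvDept (s : List (String × String)) : String := ((PySem.Dict.ofList s).get? "department").getD ""
def pvEid (s : List (String × String)) : String := ((PySem.Dict.ofList s).get? "employee_id").getD ""

def group_summaries_by_department_py (employee_summaries : List (List (String × String))) : List (String × List (List (String × String))) :=
  -- grouped = defaultdict(list); for summary in ...: grouped[summary['department']].append(summary)
  let grouped := employee_summaries.foldl
    (fun d s => d.modify (pvDept s) [] (fun g => g ++ [s])) PySem.Dict.empty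
  -- result = OrderedDict(); for dept in sorted(grouped.keys()): result[dept] = sorted(grouped[dept], key=...)
  (PySem.List.sorted grouped.keys (fun k => k) false).map
    (fun dept => (dept, PySem.List.sorted (grouped.getD dept []) pvEid false))

-- ===== PORT B =====
-- the while-loop of Source B: peel the maximal leading run of rest[0]'s department off the sorted list;
-- the inner scan to j followed by rest[:j] / rest[j:] is exactly takeWhile / dropWhile.
def pvPeelRuns : List (List (String × String)) → List (String × List (List (String × String)))
  | [] => []
  | s :: rest =>
    (pvDept s, s :: rest.takeWhile (fun t => pvDept t == pvDept s)) ::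
      pvPeelRuns (rest.dropWhile (fun t => pvDept t == pvDept s))
termination_by l => l.length
decreasing_by simpa using Nat.lt_succ_of_le (List.length_dropWhile_le _ rest)

def group_summaries_by_department_py_alt (employee_summaries : List (List (String × String))) : List (String × List (List (String × String))) :=
  -- rest = sorted(employee_summaries, key=lambda x: (x['department'], x['employee_id']))
  pvPeelRuns (PySem.List.sorted2 employee_summaries pvDept pvEid false)

-- ===== PRECONDITION & SPEC =====
-- Pre_: every summary carries both the 'department' and the 'employee_id' key; on any other input
-- the Python A raises KeyError (and B does too).
def Pre_group_summaries_by_department_py (employee_summaries : List (List (String × String))) : Prop :=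
  ∀ s ∈ employee_summaries,
    ((PySem.Dict.ofList s).get? "department").isSome = true ∧
    ((PySem.Dict.ofList s).get? "employee_id").isSome = true
instance (employee_summaries : List (List (String × String))) : Decidable (Pre_group_summaries_by_department_py employee_summaries) := by unfold Pre_group_summaries_by_department_py; infer_instance

def pvWitness_group_summaries_by_department_py : (List (List (String × String))) :=
  [[("department", "B"), ("employee_id", "2")], [("department", "A"), ("employee_id", "1")]]

def Spec_group_summaries_by_department_py (employee_summaries : List (List (String × String))) (out : List (String × List (List (String × String)))) : Prop := out = group_summaries_by_department_py_alt employee_summaries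
instance (employee_summaries : List (List (String × String))) (out : List (String × List (List (String × String)))) : Decidable (Spec_group_summaries_by_department_py employee_summaries out) := by unfold Spec_group_summaries_by_department_py; infer_instance

-- ===== CLAIM (what is proved, stated in full; the proofs are below) =====
def Claim_equal_group_summaries_by_department_py : Prop := ∀ (employee_summaries : List (List (String × String))), Dom_group_summaries_by_department_py employee_summaries → Pre_group_summaries_by_department_py employee_summaries → Spec_group_summaries_by_department_py employee_summaries (group_summaries_by_department_py employee_summaries)

-- ===== LEMMAS AND PROOFS =====

-- the lexicographic key (department, employee_id) as a single linearly ordered key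
def pvK (s : List (String × String)) : Lex (String × String) := toLex (pvDept s, pvEid s)

theorem pvK_lt_iff (a b : List (String × String)) :
    pvK a < pvK b ↔ (pvDept a < pvDept b ∨ (pvDept a = pvDept b ∧ pvEid a < pvEid b)) := by
  simp [pvK, Prod.Lex.toLex_lt_toLex]

theorem pvK_le_dept {a b : List (String × String)} (h : pvK a ≤ pvK b) : pvDept a ≤ pvDept b := by
  rcases Prod.Lex.toLex_le_toLex.mp h with h1 | ⟨h1, _⟩
  · exact le_of_lt h1
  · exact le_of_eq h1

-- sorted2 with the two key functions IS sorted with the lexicographic key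
theorem sorted2_eq_sorted_pvK (xs : List (List (String × String))) :
    PySem.List.sorted2 xs pvDept pvEid false = PySem.List.sorted xs pvK false := by
  rw [PySem.List.sorted_eq_foldl_insertBy]
  unfold PySem.List.sorted2
  simp only [Bool.false_eq_true, if_false]
  congr 1
  funext acc x
  congr 1
  funext a b
  rcases lt_trichotomy (pvDept a) (pvDept b) with h | h | h
  · simp only [decide_eq_true h, Bool.true_or,
      decide_eq_true ((pvK_lt_iff a b).mpr (Or.inl h))]
  · have h1 : ¬ pvDept a < pvDept b := by rw [h]; exact lt_irrefl _
    have h2 : ¬ pvDept b < pvDept a := by rw [h]; exact lt_irrefl _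
    by_cases he : pvEid a < pvEid b
    · simp only [decide_eq_false h1, decide_eq_false h2, decide_eq_true he,
        decide_eq_true ((pvK_lt_iff a b).mpr (Or.inr ⟨h, he⟩)), Bool.false_or,
        Bool.not_false, Bool.true_and]
    · have h3 : ¬ pvK a < pvK b := by
        rw [pvK_lt_iff]; rintro (hh | ⟨_, hh⟩); exacts [h1 hh, he hh]
      simp only [decide_eq_false h1, decide_eq_false h2, decide_eq_false he,
        decide_eq_false h3, Bool.false_or, Bool.not_false, Bool.true_and]
  · have h1 : ¬ pvDept a < pvDept b := asymm h
    have h3 : ¬ pvK a < pvK b := by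
      rw [pvK_lt_iff]
      rintro (hh | ⟨hh, _⟩)
      · exact h1 hh
      · exact absurd h (by rw [hh]; exact lt_irrefl _)
    simp only [decide_eq_false h1, decide_eq_true h, decide_eq_false h3, Bool.false_or,
      Bool.not_true, Bool.false_and]

-- the grouping fold of A: value at a key is the filter of the traversed list
theorem getD_grouping_fold (xs : List (List (String × String))) (c : String) :
    (xs.foldl (fun d s => d.modify (pvDept s) [] (fun g => g ++ [s])) PySem.Dict.empty).getD c []
      = xs.filter (fun z => pvDept z == c) := by
  have h := PySem.Dict.getD_foldl_modify_append (xs.map (fun s => (pvDept s, s)))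
    PySem.Dict.empty c
  rw [List.foldl_map] at h
  simpa [List.filter_map, Function.comp_def] using h

-- the grouping fold of A: keys are the distinct departments in first-appearance order
theorem keys_grouping_fold (xs : List (List (String × String))) :
    (xs.foldl (fun d s => d.modify (pvDept s) [] (fun g => g ++ [s])) PySem.Dict.empty).keys
      = PySem.Set.ofList (xs.map pvDept) := by
  rw [PySem.Dict.keys_foldl_modify_key xs pvDept [] (fun _ s => (fun g => g ++ [s])) PySem.Dict.empty,
      PySem.Dict.keys_empty, PySem.Set.update_nil_left]

-- everything past the peeled run has a strictly larger department
theorem dropWhile_dept_gt (d : String) (l : List (List (String × String)))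
    (hl : l.Pairwise (fun a b => pvDept a ≤ pvDept b)) (hd : ∀ t ∈ l, d ≤ pvDept t) :
    ∀ t ∈ l.dropWhile (fun t => pvDept t == d), d < pvDept t := by
  induction l with
  | nil => simp
  | cons y l ih =>
    obtain ⟨hy, hl'⟩ := List.pairwise_cons.mp hl
    by_cases hyd : pvDept y = d
    · rw [List.dropWhile_cons_of_pos (by simpa using hyd)]
      exact ih hl' (fun t ht => hd t (List.mem_cons_of_mem _ ht))
    · rw [List.dropWhile_cons_of_neg (by simpa using hyd)]
      have hdy : d < pvDept y :=
        lt_of_le_of_ne (hd y (List.mem_cons_self ..)) (Ne.symm hyd)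
      intro t ht
      rcases List.mem_cons.mp ht with rfl | ht
      · exact hdy
      · exact lt_of_lt_of_le hdy (hy t ht)

-- removing an absent element twice is removing it once
theorem discard_discard {α : Type} [BEq α] (s : List α) (x : α) :
    PySem.Set.discard (PySem.Set.discard s x) x = PySem.Set.discard s x := by
  simp [PySem.Set.discard, List.filter_filter]

-- first-occurrence dedup of a list that starts with a run of d and never sees d again
theorem ofList_run (d : String) (ds rs : List String)
    (hds : ∀ x ∈ ds, x = d) (hrs : d ∉ rs) :
    PySem.Set.ofList (d :: (ds ++ rs)) = d :: PySem.Set.ofList rs := by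
  rw [PySem.Set.ofList_cons]
  congr 1
  induction ds with
  | nil =>
    simp only [List.nil_append, PySem.Set.discard]
    refine List.filter_eq_self.mpr (fun y hy => ?_)
    have hyd : y ≠ d := fun h => hrs (h ▸ (PySem.Set.mem_ofList rs y).mp hy)
    simpa using hyd
  | cons x ds ih =>
    have hx : x = d := hds x (List.mem_cons_self ..)
    subst hx
    rw [List.cons_append, PySem.Set.ofList_cons]
    have hstep : PySem.Set.discard (x :: (PySem.Set.ofList (ds ++ rs)).discard x) x
        = PySem.Set.discard ((PySem.Set.ofList (ds ++ rs)).discard x) x := by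
      simp only [PySem.Set.discard]
      rw [List.filter_cons_of_neg (by simp)]
    rw [hstep, discard_discard]
    exact ih (fun y hy => hds y (List.mem_cons_of_mem _ hy))

-- peeling runs of a department-sorted list = mapping its distinct departments to their filters
theorem peelRuns_eq : ∀ ys : List (List (String × String)),
    ys.Pairwise (fun a b => pvDept a ≤ pvDept b) →
    pvPeelRuns ys
      = (PySem.Set.ofList (ys.map pvDept)).map
          (fun d => (d, ys.filter (fun z => pvDept z == d))) := by
  intro ys
  induction ys using pvPeelRuns.induct with
  | case1 => intro _; simp [pvPeelRuns, PySem.Set.ofList_nil]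
  | case2 s rest ih =>
    intro hys
    obtain ⟨hd0, hrest⟩ := List.pairwise_cons.mp hys
    have hsplit : rest.takeWhile (fun t => pvDept t == pvDept s)
        ++ rest.dropWhile (fun t => pvDept t == pvDept s) = rest :=
      List.takeWhile_append_dropWhile
    have hrun : ∀ t ∈ rest.takeWhile (fun t => pvDept t == pvDept s), pvDept t = pvDept s :=
      fun t ht => by simpa using List.mem_takeWhile_imp ht
    have hdrop : ∀ t ∈ rest.dropWhile (fun t => pvDept t == pvDept s), pvDept s < pvDept t :=
      dropWhile_dept_gt (pvDept s) rest hrest hd0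
    have hdropne : ∀ t ∈ rest.dropWhile (fun t => pvDept t == pvDept s), pvDept t ≠ pvDept s :=
      fun t ht => ne_of_gt (hdrop t ht)
    -- the distinct departments: pvDept s first, then those of the peeled-off tail
    have hof : PySem.Set.ofList ((s :: rest).map pvDept)
        = pvDept s :: PySem.Set.ofList ((rest.dropWhile (fun t => pvDept t == pvDept s)).map pvDept) := by
      conv_lhs => rw [List.map_cons, ← hsplit, List.map_append]
      exact ofList_run (pvDept s) _ _
        (fun x hx => by obtain ⟨t, ht, rfl⟩ := List.mem_map.mp hx; exact hrun t ht)
        (fun hx => by obtain ⟨t, ht, ht'⟩ := List.mem_map.mp hx; exact hdropne t ht ht')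
    -- the run of pvDept s is exactly its filter
    have hfilt : (s :: rest).filter (fun z => pvDept z == pvDept s)
        = s :: rest.takeWhile (fun t => pvDept t == pvDept s) := by
      rw [List.filter_cons_of_pos (by simp)]
      conv_lhs => rw [← hsplit]
      rw [List.filter_append,
          List.filter_eq_self.mpr (fun t ht => by simpa using hrun t ht),
          List.filter_eq_nil_iff.mpr (fun t ht hq => hdropne t ht (by simpa using hq)),
          List.append_nil]
    -- a later department filters past the whole leading run
    have hfilt2 : ∀ k, k ≠ pvDept s →
        (s :: rest).filter (fun z => pvDept z == k)
          = (rest.dropWhile (fun t => pvDept t == pvDept s)).filter (fun z => pvDept z == k) := by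
      intro k hk
      rw [List.filter_cons_of_neg (by simpa using fun h => hk h.symm)]
      conv_lhs => rw [← hsplit]
      rw [List.filter_append,
          List.filter_eq_nil_iff.mpr (fun t ht hq => hk (by
            have h2 := hrun t ht; simp only [beq_iff_eq] at hq; rw [← hq, h2])),
          List.nil_append]
    rw [pvPeelRuns, hof, List.map_cons, hfilt,
        ih (List.Pairwise.sublist (List.dropWhile_sublist _) hrest)]
    refine congrArg _ (List.map_congr_left (fun k hk => ?_))
    have hkne : k ≠ pvDept s := by
      obtain ⟨t, ht, rfl⟩ := List.mem_map.mp ((PySem.Set.mem_ofList _ _).mp hk)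
      exact (hdropne t ht)
    rw [hfilt2 k hkne]

-- filtering past an inserted element that fails the predicate
theorem filter_insertBy_neg {α : Type} (bf : α → α → Bool) (p : α → Bool) (x : α) (ys : List α)
    (hx : p x = false) :
    (PySem.List.insertBy bf x ys).filter p = ys.filter p := by
  induction ys with
  | nil => simp [PySem.List.insertBy, hx]
  | cons y ys ih =>
    rw [PySem.List.insertBy.eq_2]
    split_ifs with h
    · simp [List.filter, hx]
    · simp only [List.filter_cons]
      split <;> simp [ih]

-- filtering a lex insertion into a lex-sorted list = insertion by employee_id into the filtered list
theorem filter_insertBy_pos (d : String) (x : List (String × String))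
    (ys : List (List (String × String))) (hx : pvDept x = d)
    (hys : ys.Pairwise (fun a b => pvK a ≤ pvK b)) :
    (PySem.List.insertBy (fun a b => decide (pvK a < pvK b)) x ys).filter (fun z => pvDept z == d)
      = PySem.List.insertBy (fun a b => decide (pvEid a < pvEid b)) x
          (ys.filter (fun z => pvDept z == d)) := by
  induction ys with
  | nil => simp [PySem.List.insertBy, hx]
  | cons y ys ih =>
    obtain ⟨hyall, hys'⟩ := List.pairwise_cons.mp hys
    rw [PySem.List.insertBy.eq_2]
    by_cases hK : pvK x < pvK y
    · rw [if_pos (by simpa using hK)]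
      by_cases hyd : pvDept y = d
      · have he : pvEid x < pvEid y := by
          rcases (pvK_lt_iff x y).mp hK with h | ⟨_, h⟩
          · exact absurd h (by rw [hx, hyd]; exact lt_irrefl _)
          · exact h
        rw [List.filter_cons_of_pos (by simpa using hx), List.filter_cons_of_pos (by simpa using hyd),
            PySem.List.insertBy.eq_2, if_pos (by simpa using he)]
      · have hxfront : ∀ z ∈ ys.filter (fun z => pvDept z == d), pvEid x < pvEid z := by
          intro z hz
          have hzmem := List.mem_of_mem_filter hz
          have hzd : pvDept z = d := by simpa using List.of_mem_filter hz
          have hKz : pvK x < pvK z := lt_of_lt_of_le hK (hyall z hzmem)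
          rcases (pvK_lt_iff x z).mp hKz with h | ⟨_, h⟩
          · exact absurd h (by rw [hx, hzd]; exact lt_irrefl d)
          · exact h
        rw [List.filter_cons_of_pos (by simpa using hx), List.filter_cons_of_neg (by simpa using hyd)]
        cases hfy : ys.filter (fun z => pvDept z == d) with
        | nil => simp [PySem.List.insertBy]
        | cons z zs =>
          rw [PySem.List.insertBy.eq_2, if_pos]
          simp only [decide_eq_true_eq]
          exact hxfront z (by rw [hfy]; exact List.mem_cons_self ..)
    · rw [if_neg (by simpa using hK)]
      by_cases hyd : pvDept y = d
      · have hKe : ¬ pvEid x < pvEid y := fun he =>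
          hK ((pvK_lt_iff x y).mpr (Or.inr ⟨by rw [hx, hyd], he⟩))
        rw [List.filter_cons_of_pos (by simpa using hyd),
            List.filter_cons_of_pos (by simpa using hyd),
            PySem.List.insertBy.eq_2, if_neg (by simpa using hKe), ih hys']
      · rw [List.filter_cons_of_neg (by simpa using hyd),
            List.filter_cons_of_neg (by simpa using hyd), ih hys']

-- filtering the lex-sorted list on a department = sorting the department's filter by employee_id
theorem filter_sorted_pvK (d : String) (xs : List (List (String × String))) :
    (PySem.List.sorted xs pvK false).filter (fun z => pvDept z == d)
      = PySem.List.sorted (xs.filter (fun z => pvDept z == d)) pvEid false := by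
  induction xs using List.reverseRecOn with
  | nil => simp [PySem.List.sorted_eq_foldl_insertBy]
  | append_singleton xs x ih =>
    rw [PySem.List.sorted_eq_foldl_insertBy, List.foldl_append, List.foldl_cons, List.foldl_nil,
        ← PySem.List.sorted_eq_foldl_insertBy]
    by_cases hx : pvDept x = d
    · rw [filter_insertBy_pos d x _ hx (PySem.List.sorted_pairwise xs pvK), ih,
          List.filter_append, List.filter_cons_of_pos (by simpa using hx), List.filter_nil,
          PySem.List.sorted_eq_foldl_insertBy (xs.filter _ ++ [x]), List.foldl_append,
          List.foldl_cons, List.foldl_nil, ← PySem.List.sorted_eq_foldl_insertBy]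
    · rw [filter_insertBy_neg _ _ _ _ (by simpa using hx), ih,
          List.filter_append, List.filter_cons_of_neg (by simpa using hx), List.filter_nil,
          List.append_nil]

-- ofList (first-occurrence dedup) preserves Pairwise
theorem pairwise_ofList {α : Type} [BEq α] [LawfulBEq α] {R : α → α → Prop} (l : List α) :
    l.Pairwise R → (PySem.Set.ofList l).Pairwise R := by
  induction l using List.reverseRecOn with
  | nil => intro _; simp [PySem.Set.ofList_nil]
  | append_singleton xs x ih =>
    intro h
    rw [List.pairwise_append] at h
    obtain ⟨h1, _, h2⟩ := h
    rw [PySem.Set.ofList_append_singleton, PySem.Set.add_eq_ite]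
    split_ifs with hmem
    · exact ih h1
    · rw [List.pairwise_append]
      refine ⟨ih h1, List.pairwise_singleton .., ?_⟩
      intro a ha b hb
      exact h2 a ((PySem.Set.mem_ofList xs a).mp ha) b hb

-- the distinct departments of the lex-sorted list, in order, = sorted distinct departments
theorem ofList_map_dept_sorted (xs : List (List (String × String))) :
    PySem.List.sorted (PySem.Set.ofList (xs.map pvDept)) (fun k => k) false
      = PySem.Set.ofList ((PySem.List.sorted xs pvK false).map pvDept) := by
  apply PySem.List.sorted_eq_of_perm_of_pairwise_lt
  · rw [List.perm_ext_iff_of_nodup (PySem.Set.nodup_ofList _) (PySem.Set.nodup_ofList _)]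
    intro a
    rw [PySem.Set.mem_ofList, PySem.Set.mem_ofList, List.mem_map, List.mem_map]
    constructor
    · rintro ⟨s, hs, rfl⟩
      exact ⟨s, (PySem.List.sorted_perm xs pvK false).mem_iff.mp hs, rfl⟩
    · rintro ⟨s, hs, rfl⟩
      exact ⟨s, (PySem.List.sorted_perm xs pvK false).mem_iff.mpr hs, rfl⟩
  · have h1 : ((PySem.List.sorted xs pvK false).map pvDept).Pairwise (· ≤ ·) :=
      List.Pairwise.map pvDept (fun a b h => pvK_le_dept h) (PySem.List.sorted_pairwise xs pvK)
    have h2 := (pairwise_ofList _ h1).and (PySem.Set.nodup_ofList ((PySem.List.sorted xs pvK false).map pvDept))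
    exact h2.imp (fun hab => lt_of_le_of_ne hab.1 hab.2)

-- ===== VERDICT (by name: the statement is the Claim_ definition above) =====
theorem group_summaries_by_department_py_spec : Claim_equal_group_summaries_by_department_py := by
  intro xs _ _
  unfold Spec_group_summaries_by_department_py
  unfold group_summaries_by_department_py group_summaries_by_department_py_alt
  simp only [sorted2_eq_sorted_pvK]
  rw [peelRuns_eq _ (List.Pairwise.imp pvK_le_dept (PySem.List.sorted_pairwise xs pvK))]
  rw [keys_grouping_fold, ofList_map_dept_sorted]
  apply List.map_congr_left
  intro k _
  rw [getD_grouping_fold, filter_sorted_pvK]
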